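-- pv_equiv track=rewrite | github.com/haydenj/2018-Advent-of-Code | Day 2 Puzzle 2.py | finddupe
-- ===== SOURCE A (Python) =====
-- import collections
--
-- def removeletter(words, place):
--     """ Removes the place-position letter from word in words and adds to counter. """
--
--     counter = collections.Counter()
--
--     for word in words:
--         modword = list(word)
--         try:
--             del modword[place]
--             modword = ''.join(modword)
--             counter[modword] += 1
--         except IndexError:
--             pass
--
--     return counter
--
-- def finddupe(words):
--     """ Find first instance of two strings in words differing by single letter in same place
--     and return common substring. """
--
--     found = False
--     index = 0
--     dupe = None
--
--     # get largest length of string in words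
--     bound = max([len(word) for word in words])
--
--     while not found and index < bound:
--         counter = removeletter(words, index)
--         counts = dict(counter).values()
--         if 2 in counts:
--             found = True
--             dupe = counter.most_common(1)[0][0]
--         index += 1
--
--     return dupe
-- ===== SOURCE B (Python) =====
-- import collections
--
-- def finddupe(words):
--     """ Find first instance of two strings in words differing by single letter in same place
--     and return common substring. """
--
--     # one pass over words: counters[p] counts each word with position p deleted
--     counters = {}
--     bound = 0
--     for word in words:
--         if len(word) > bound:
--             bound = len(word)
--         for p in range(len(word)):
--             counters.setdefault(p, collections.Counter())[word[:p] + word[p + 1:]] += 1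
--
--     for p in range(bound):
--         counter = counters.get(p, collections.Counter())
--         if 2 in dict(counter).values():
--             return counter.most_common(1)[0][0]
--
--     return None
-- ===== Notes on version B (the rewrite author's own statement) =====
-- stated objective: alternative
-- what changed: A rescans the whole word list for every position, building a fresh Counter per position; B makes one pass over the words, filling a dict position -> Counter (and the max length) as it goes, then scans positions for the first counter containing a 2.
-- outside the precondition, e.g. on finddupe([]): A raises ValueError, B returns None
import Mathlib
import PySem

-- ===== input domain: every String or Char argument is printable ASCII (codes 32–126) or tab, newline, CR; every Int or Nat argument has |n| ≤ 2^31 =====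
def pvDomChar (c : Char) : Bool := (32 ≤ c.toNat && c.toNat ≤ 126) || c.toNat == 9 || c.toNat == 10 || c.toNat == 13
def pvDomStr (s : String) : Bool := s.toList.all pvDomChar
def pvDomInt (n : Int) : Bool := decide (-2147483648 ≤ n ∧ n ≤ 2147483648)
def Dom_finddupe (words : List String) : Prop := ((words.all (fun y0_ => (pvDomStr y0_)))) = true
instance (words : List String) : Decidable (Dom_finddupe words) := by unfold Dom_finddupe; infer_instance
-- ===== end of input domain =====

-- B replaces A's per-position rescans of the word list (building a fresh Counter for each
-- position) by ONE pass over the words that fills a dict position → Counter, then scans the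
-- positions; objective: alternative decomposition (same most_common tie behaviour reproduced).

-- ===== PORT A =====
-- shared library helper: counter.most_common(1)[0][0] — stable sort by count, reverse=True,
-- first element; none = IndexError on an empty counter (unreachable: guarded by '2 in values')
def mostCommon1 (counter : PySem.Dict String Int) : Option String :=
  match PySem.List.sorted counter.items (fun kv => kv.2) true with
  | [] => none
  | (k, _) :: _ => some k

-- removeletter(words, place): for each word, delete position `place` (IndexError → skip) and
-- count the remainder; ''.join of a list of single chars is String.ofList (exact)
def removeletter (words : List String) (place : Int) : PySem.Dict String Int :=
  words.foldl (fun counter word =>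
    match PySem.List.pop? word.toList place with
    | none => counter
    | some (_, modword) => counter.modify (String.ofList modword) 0 (· + 1)) PySem.Dict.empty

-- the while loop: fuel = bound - index (the loop exits as soon as a counter has a 2)
def finddupeLoop (words : List String) : Int → Nat → Option String
  | _, 0 => none
  | index, fuel + 1 =>
    let counter := removeletter words index
    if (2 : Int) ∈ counter.values then mostCommon1 counter
    else finddupeLoop words (index + 1) fuel

def finddupe (words : List String) : Option String :=
  match PySem.List.max? (words.map (fun word => PySem.Str.len word)) (fun y => y) with
  | none => none   -- max([...]) raises ValueError on an empty words list; excluded by Pre_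
  | some bound => finddupeLoop words 0 bound.toNat

-- ===== PORT B =====
-- one pass over words: counters[p] counts every word with position p deleted; bound = max length
def buildCounters (words : List String) :
    PySem.Dict Int (PySem.Dict String Int) × Int :=
  words.foldl (fun acc word =>
    let n : Int := PySem.Str.len word
    let bound := if acc.2 < n then n else acc.2
    let table := (PySem.List.pyRange 0 n).foldl (fun t p =>
      t.modify p PySem.Dict.empty (fun c =>
        c.modify (String.ofList (PySem.List.slice word.toList none (some p) ++
                             PySem.List.slice word.toList (some (p + 1)) none)) 0 (· + 1))) acc.1
    (table, bound)) (PySem.Dict.empty, 0)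

-- for p in range(bound): early return on the first counter containing a 2
def scanCounters (counters : PySem.Dict Int (PySem.Dict String Int)) :
    List Int → Option String
  | [] => none
  | p :: rest =>
    let counter := counters.getD p PySem.Dict.empty
    if (2 : Int) ∈ counter.values then mostCommon1 counter
    else scanCounters counters rest

def finddupe_alt (words : List String) : Option String :=
  let tb := buildCounters words
  scanCounters tb.1 (PySem.List.pyRange 0 tb.2)

-- ===== PRECONDITION & SPEC =====
-- Pre_ excludes only the empty list, on which A's max([]) raises ValueError.
def Pre_finddupe (words : List String) : Prop := words ≠ []
instance (words : List String) : Decidable (Pre_finddupe words) := by unfold Pre_finddupe; infer_instance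
def pvWitness_finddupe : List String := ["abc", "adc", "xy"]

def Spec_finddupe (words : List String) (out : Option String) : Prop := out = finddupe_alt words
instance (words : List String) (out : Option String) : Decidable (Spec_finddupe words out) := by unfold Spec_finddupe; infer_instance

-- ===== CLAIM (what is proved, stated in full; the proofs are below) =====
def Claim_equal_finddupe : Prop := ∀ (words : List String), Dom_finddupe words → Pre_finddupe words → Spec_finddupe words (finddupe words)

-- ===== LEMMAS AND PROOFS =====

-- a fold of modifies at nodup keys, observed at one key
theorem getD_foldl_modify_nodup (L : List Int) (hnd : L.Nodup)
    (t : PySem.Dict Int (PySem.Dict String Int)) (p : Int)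
    (g : Int → PySem.Dict String Int → PySem.Dict String Int) :
    (L.foldl (fun t q => t.modify q PySem.Dict.empty (g q)) t).getD p PySem.Dict.empty =
      if p ∈ L then g p (t.getD p PySem.Dict.empty) else t.getD p PySem.Dict.empty := by
  induction L generalizing t with
  | nil => simp
  | cons q L ih =>
    simp only [List.foldl_cons]
    rw [ih (List.Nodup.of_cons hnd)]
    rcases eq_or_ne p q with rfl | hne
    · have : p ∉ L := (List.nodup_cons.mp hnd).1
      simp [this, PySem.Dict.getD_modify_self]
    · simp [PySem.Dict.getD_modify, hne]

-- del modword[place] raises IndexError for a nonnegative out-of-range place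
theorem pop?_none_of_ge {α : Type} (xs : List α) (p : Int) (h : 0 ≤ p) (h2 : (xs.length:Int) ≤ p) :
    PySem.List.pop? xs p = none := by
  have : ¬ (p < (xs.length:Int)) := by omega
  simp [PySem.List.pop?, PySem.List.pyIdx?, h, this]

-- deleting an in-range position p equals word[:p] + word[p+1:]
theorem step_key (w : String) (p : Int) (h0 : 0 ≤ p) (hn : p < (w.toList.length : Int)) :
    ∃ x, PySem.List.pop? w.toList p =
      some (x, PySem.List.slice w.toList none (some p) ++ PySem.List.slice w.toList (some (p + 1)) none) := by
  obtain ⟨k, rfl⟩ : ∃ k : Nat, p = (k : Int) := ⟨p.toNat, by omega⟩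
  refine ⟨w.toList[k]'(by exact_mod_cast hn), ?_⟩
  rw [PySem.List.pop?_natCast w.toList k (by exact_mod_cast hn)]
  rw [PySem.List.slice_to w.toList h0, PySem.List.slice_from w.toList (by omega : (0:Int) ≤ (k:Int) + 1)]
  have h1 : ((k:Int) + 1).toNat = k + 1 := by omega
  have h2 : ((k:Int)).toNat = k := by omega
  simp [h1, h2, List.eraseIdx_eq_take_drop_succ]

-- B's one pass, observed at position p, is exactly A's removeletter fold
theorem build_getD (ws : List String) :
    ∀ (t : PySem.Dict Int (PySem.Dict String Int)) (b : Int) (p : Int), 0 ≤ p →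
    ((ws.foldl (fun acc word =>
      let n : Int := PySem.Str.len word
      let bound := if acc.2 < n then n else acc.2
      let table := (PySem.List.pyRange 0 n).foldl (fun t p =>
        t.modify p PySem.Dict.empty (fun c =>
          c.modify (String.ofList (PySem.List.slice word.toList none (some p) ++
                               PySem.List.slice word.toList (some (p + 1)) none)) 0 (· + 1))) acc.1
      (table, bound)) (t, b)).1).getD p PySem.Dict.empty =
    ws.foldl (fun counter word =>
      match PySem.List.pop? word.toList p with
      | none => counter
      | some (_, modword) => counter.modify (String.ofList modword) 0 (· + 1))
      (t.getD p PySem.Dict.empty) := by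
  induction ws with
  | nil => intro t b p hp; simp
  | cons w ws ih =>
    intro t b p hp
    simp only [List.foldl_cons]
    rw [ih]
    · congr 1
      rw [getD_foldl_modify_nodup _ (PySem.List.nodup_pyRange_one 0 _)]
      by_cases hmem : p ∈ PySem.List.pyRange 0 (PySem.Str.len w)
      · have hb := PySem.List.mem_pyRange_one.mp hmem
        rw [PySem.Str.len_eq] at hb
        obtain ⟨x, hx⟩ := step_key w p hp hb.2
        rw [if_pos hmem, hx]
      · have hb : ¬ (0 ≤ p ∧ p < PySem.Str.len w) := fun h => hmem (PySem.List.mem_pyRange_one.mpr h)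
        rw [PySem.Str.len_eq] at hb
        have : (w.toList.length : Int) ≤ p := by omega
        rw [if_neg hmem, pop?_none_of_ge w.toList p hp this]
    · exact hp

-- B's running maximum is the fold of max over the word lengths
theorem build_bound (ws : List String) :
    ∀ (t : PySem.Dict Int (PySem.Dict String Int)) (b : Int),
    ((ws.foldl (fun acc word =>
      let n : Int := PySem.Str.len word
      let bound := if acc.2 < n then n else acc.2
      let table := (PySem.List.pyRange 0 n).foldl (fun t p =>
        t.modify p PySem.Dict.empty (fun c =>
          c.modify (String.ofList (PySem.List.slice word.toList none (some p) ++
                               PySem.List.slice word.toList (some (p + 1)) none)) 0 (· + 1))) acc.1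
      (table, bound)) (t, b)).2) =
    (ws.map (fun w => PySem.Str.len w)).foldl max b := by
  induction ws with
  | nil => intro t b; simp
  | cons w ws ih =>
    intro t b
    simp only [List.foldl_cons, List.map_cons]
    rw [ih]
    congr 1
    rcases lt_or_ge b (PySem.Str.len w) with h | h
    · rw [if_pos h, max_eq_right (le_of_lt h)]
    · rw [if_neg (not_lt.mpr h), max_eq_left h]

-- the two early-exit scans agree when the counters agree position by position
theorem loop_eq_scan (words : List String) (counters : PySem.Dict Int (PySem.Dict String Int))
    (hc : ∀ p : Int, 0 ≤ p → counters.getD p PySem.Dict.empty = removeletter words p) :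
    ∀ (fuel : Nat) (index : Int), 0 ≤ index →
    finddupeLoop words index fuel = scanCounters counters (PySem.List.pyRange index (index + fuel)) := by
  intro fuel
  induction fuel with
  | zero =>
    intro index _
    simp [finddupeLoop, scanCounters]
  | succ fuel ih =>
    intro index hidx
    have hlt : index < index + ((fuel:Int) + 1) := by omega
    rw [show ((index:Int) + ((fuel+1 : Nat):Int)) = index + ((fuel:Int)+1) by push_cast; ring]
    rw [PySem.List.pyRange_one_cons hlt]
    simp only [finddupeLoop, scanCounters]
    rw [hc index hidx]
    by_cases h2 : (2 : Int) ∈ (removeletter words index).values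
    · simp [h2]
    · simp only [h2, if_false]
      rw [ih (index + 1) (by omega)]
      congr 2
      ring


-- corollaries phrased via buildCounters
theorem buildCounters_getD (ws : List String) (p : Int) (hp : 0 ≤ p) :
    (buildCounters ws).1.getD p PySem.Dict.empty = removeletter ws p := by
  have h := build_getD ws PySem.Dict.empty 0 p hp
  rw [PySem.Dict.getD_empty] at h
  exact h

theorem buildCounters_bound (ws : List String) :
    (buildCounters ws).2 = (ws.map (fun w => PySem.Str.len w)).foldl max 0 :=
  build_bound ws PySem.Dict.empty 0

-- ===== VERDICT (by name: the statement is the Claim_ definition above) =====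
theorem finddupe_spec : Claim_equal_finddupe := by
  intro words _ hpre
  unfold Spec_finddupe
  cases words with
  | nil => exact absurd rfl hpre
  | cons w ws =>
    have h0w : (0:Int) ≤ PySem.Str.len w := by rw [PySem.Str.len_eq]; positivity
    have hbound : (buildCounters (w :: ws)).2 =
        (ws.map (fun x => PySem.Str.len x)).foldl max (PySem.Str.len w) := by
      rw [buildCounters_bound]
      simp only [List.map_cons, List.foldl_cons, max_eq_right h0w]
    have hnn : (0:Int) ≤ (buildCounters (w :: ws)).2 := by
      rw [hbound]; exact le_trans h0w (PySem.List.le_foldl_max _ _).1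
    show finddupe (w :: ws) = finddupe_alt (w :: ws)
    unfold finddupe finddupe_alt
    simp only [List.map_cons, PySem.List.max?_id_cons]
    rw [loop_eq_scan (w :: ws) (buildCounters (w :: ws)).1
        (fun p hp => buildCounters_getD (w :: ws) p hp) _ 0 le_rfl]
    rw [hbound] at hnn
    rw [hbound]
    have harith : (0 : Int) + (((ws.map (fun word => PySem.Str.len word)).foldl max (PySem.Str.len w)).toNat : Int) =
        (ws.map (fun word => PySem.Str.len word)).foldl max (PySem.Str.len w) := by omega
    rw [harith]
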